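-- pv_equiv track=rewrite | github.com/SandeepK1729/AI-lab | week-12 forward chaining.py | check
-- ===== SOURCE A (Python) =====
-- def check(knowns, facts):
--     result = []
--     for known in knowns:
--         for A, B in facts:
--             if known == A and (A, B) not in result:
--                 result.append((A, B))
--                 knowns.append(B)
--     return result
-- ===== SOURCE B (Python) =====
-- def check(knowns, facts):
--     # Index the rules by their antecedent once, then run a worklist (BFS) over a
--     # growing queue with a read pointer, using a set for O(1) duplicate tests.
--     # Unlike A, this does not mutate `knowns`; the RETURN value is the same.
--     index = {}
--     for pair in facts:
--         index.setdefault(pair[0], []).append(pair)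
--     result = []
--     in_result = set()
--     queue = list(knowns)
--     i = 0
--     while i < len(queue):
--         k = queue[i]
--         i += 1
--         for pair in index.get(k, []):
--             if pair not in in_result:
--                 in_result.add(pair)
--                 result.append(pair)
--                 queue.append(pair[1])
--     return result
-- ===== Notes on version B (the rewrite author's own statement) =====
-- stated objective: faster
-- what changed: Replaces A's rescans of the whole fact list for every (growing) known and its linear list-membership test on result by a one-time dict index from antecedent to its facts, a set for O(1) duplicate tests, and an explicit FIFO worklist; B also does not mutate knowns (A appends to it), the return value is identical.
import Mathlib
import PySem

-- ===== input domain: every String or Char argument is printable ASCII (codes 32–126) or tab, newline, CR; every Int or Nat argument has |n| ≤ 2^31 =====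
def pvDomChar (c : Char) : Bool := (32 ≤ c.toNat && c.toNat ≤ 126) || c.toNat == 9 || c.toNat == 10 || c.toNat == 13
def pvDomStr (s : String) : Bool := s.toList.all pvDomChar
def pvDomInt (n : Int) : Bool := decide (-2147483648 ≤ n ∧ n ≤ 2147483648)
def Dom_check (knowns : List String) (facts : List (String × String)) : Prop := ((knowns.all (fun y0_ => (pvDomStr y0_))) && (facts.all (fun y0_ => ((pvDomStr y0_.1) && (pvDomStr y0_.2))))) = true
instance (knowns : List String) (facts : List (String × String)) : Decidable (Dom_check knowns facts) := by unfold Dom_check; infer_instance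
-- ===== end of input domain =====

-- B indexes the facts by antecedent in a dict, keeps a set for duplicate tests and an
-- explicit FIFO worklist instead of A's rescans of the whole fact list; B does not mutate
-- `knowns` (A appends to it in place) — the equivalence proved here is about the RETURN value.


-- ===== PORT A =====
-- inner 'for A, B in facts' loop for one `known` k: accumulates new result pairs and
-- the consequents appended to `knowns` (`pending`).
def checkScan (k : String) : List (String × String) → List (String × String) → List String →
    List (String × String) × List String
  | [], result, pending => (result, pending)
  | (a, b) :: fs, result, pending =>
    if k == a && !(result.contains (a, b)) then
      checkScan k fs (result ++ [(a, b)]) (pending ++ [b])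
    else
      checkScan k fs result pending

-- outer 'for known in knowns' loop; the list grows while being iterated, so it is a
-- worklist; the fuel is a termination guard only (each append matches a new result pair,
-- so at most knowns.length + facts.length entries are ever processed).
def checkGo (facts : List (String × String)) : Nat → List String → List (String × String) →
    List (String × String)
  | 0, _, result => result
  | _ + 1, [], result => result
  | fuel + 1, k :: rest, result =>
    let (result', app) := checkScan k facts result []
    checkGo facts fuel (rest ++ app) result'

def check (knowns : List String) (facts : List (String × String)) : List (String × String) :=
  checkGo facts (knowns.length + facts.length + 1) knowns []

-- ===== PORT B =====
-- index.setdefault(pair[0], []).append(pair) over facts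
def altIndex : List (String × String) → PySem.Dict String (List (String × String)) →
    PySem.Dict String (List (String × String))
  | [], d => d
  | p :: ps, d => altIndex ps (d.modify p.1 [] (· ++ [p]))

-- inner 'for pair in index.get(k, [])' loop: state (in_result, result, queue)
def altInner : List (String × String) → PySem.Set (String × String) →
    List (String × String) → List String →
    PySem.Set (String × String) × List (String × String) × List String
  | [], s, result, queue => (s, result, queue)
  | p :: ps, s, result, queue =>
    if PySem.Set.contains s p then altInner ps s result queue
    else altInner ps (PySem.Set.add s p) (result ++ [p]) (queue ++ [p.2])

-- 'while i < len(queue)' over the growing queue, with read pointer i;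
-- same termination fuel guard as in port A.
def altGo (index : PySem.Dict String (List (String × String))) : Nat → List String → Nat →
    PySem.Set (String × String) → List (String × String) → List (String × String)
  | 0, _, _, _, result => result
  | fuel + 1, queue, i, s, result =>
    if h : i < queue.length then
      let k := queue[i]
      let (s', result', queue') := altInner (index.getD k []) s result queue
      altGo index fuel queue' (i + 1) s' result'
    else result

def check_alt (knowns : List String) (facts : List (String × String)) : List (String × String) :=
  altGo (altIndex facts PySem.Dict.empty) (knowns.length + facts.length + 1) knowns 0
    PySem.Set.empty []

-- ===== PRECONDITION & SPEC =====
def Spec_check (knowns : List String) (facts : List (String × String)) (out : List (String × String)) : Prop := out = check_alt knowns facts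
instance (knowns : List String) (facts : List (String × String)) (out : List (String × String)) : Decidable (Spec_check knowns facts out) := by unfold Spec_check; infer_instance

-- ===== CLAIM (what is proved, stated in full; the proofs are below) =====
def Claim_equal_check : Prop := ∀ (knowns : List String) (facts : List (String × String)), Dom_check knowns facts → Spec_check knowns facts (check knowns facts)

-- ===== LEMMAS AND PROOFS =====

-- the dict built by altIndex holds, under each key k, exactly the facts whose antecedent is k
theorem altIndex_getD (facts : List (String × String))
    (d : PySem.Dict String (List (String × String))) (k : String) :
    (altIndex facts d).getD k [] = d.getD k [] ++ facts.filter (fun p => p.1 == k) := by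
  induction facts generalizing d with
  | nil => simp [altIndex]
  | cons p ps ih =>
    rw [altIndex, ih, List.filter_cons]
    by_cases h : p.1 = k
    · subst h
      simp [PySem.Dict.getD_modify_self]
    · have hb : (p.1 == k) = false := by simp [h]
      rw [PySem.Dict.getD_modify_of_ne _ _ _ (Ne.symm h), hb]
      simp

-- the pending accumulator of A's inner scan is an append-accumulator
theorem checkScan_acc (k : String) (fs : List (String × String))
    (result : List (String × String)) (pend : List String) :
    checkScan k fs result pend =
      ((checkScan k fs result []).1, pend ++ (checkScan k fs result []).2) := by
  induction fs generalizing result pend with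
  | nil => simp [checkScan]
  | cons p ps ih =>
    obtain ⟨a, b⟩ := p
    by_cases h : (k == a && !(result.contains (a, b))) = true
    · rw [checkScan, if_pos h, checkScan, if_pos h]
      simp only [List.nil_append]
      rw [ih (result ++ [(a, b)]) (pend ++ [b]), ih (result ++ [(a, b)]) [b]]
      simp
    · rw [checkScan, if_neg h, checkScan, if_neg h, ih result pend]

-- B's inner loop over the indexed facts equals A's inner scan over ALL facts,
-- given the set mirrors membership in result
theorem altInner_eq (k : String) (fs : List (String × String)) :
    ∀ (s : PySem.Set (String × String)) (result : List (String × String)) (q : List String),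
    (∀ p, p ∈ s ↔ p ∈ result) →
    altInner (fs.filter (fun p => p.1 == k)) s result q =
      ((altInner (fs.filter (fun p => p.1 == k)) s result q).1,
        (checkScan k fs result []).1, q ++ (checkScan k fs result []).2) ∧
    (∀ p, p ∈ (altInner (fs.filter (fun p => p.1 == k)) s result q).1 ↔
      p ∈ (checkScan k fs result []).1) := by
  induction fs with
  | nil => intro s result q hinv; simpa [altInner, checkScan] using hinv
  | cons p ps ih =>
    intro s result q hinv
    obtain ⟨a, b⟩ := p
    rw [List.filter_cons]
    by_cases ha : a = k
    · subst ha
      simp only [beq_self_eq_true, if_pos]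
      by_cases hmem : (a, b) ∈ result
      · have hs : PySem.Set.contains s (a, b) = true :=
          (PySem.Set.contains_iff s _).2 ((hinv _).2 hmem)
        rw [altInner, if_pos hs, checkScan, if_neg (by simp [hmem])]
        exact ih s result q hinv
      · have hs : ¬ PySem.Set.contains s (a, b) = true :=
          fun h => hmem ((hinv _).1 ((PySem.Set.contains_iff s _).1 h))
        rw [altInner, if_neg hs, checkScan, if_pos (by simp [hmem])]
        simp only [List.nil_append]
        rw [checkScan_acc a ps (result ++ [(a, b)]) [b]]
        have hinv' : ∀ p, p ∈ PySem.Set.add s (a, b) ↔ p ∈ result ++ [(a, b)] := by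
          intro p
          rw [PySem.Set.mem_add]
          simp [hinv p]
        obtain ⟨h1, h2⟩ := ih (PySem.Set.add s (a, b)) (result ++ [(a, b)]) (q ++ [b]) hinv'
        refine ⟨?_, h2⟩
        rw [h1]
        simp
    · have hb : (a == k) = false := by simp [ha]
      have hk : (k == a) = false := by simp [Ne.symm ha]
      rw [hb]
      simp only [Bool.false_eq_true, ite_false]
      rw [checkScan, hk]
      simp only [Bool.false_and, Bool.false_eq_true, ite_false]
      exact ih s result q hinv

-- the two worklist loops agree step by step: B's pointer i into its queue
-- corresponds to A's remaining worklist queue.drop i (same fuel)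
theorem altGo_eq_checkGo (facts : List (String × String)) (fuel : Nat) :
    ∀ (queue : List String) (i : Nat) (s : PySem.Set (String × String))
      (result : List (String × String)),
    (∀ p, p ∈ s ↔ p ∈ result) →
    altGo (altIndex facts PySem.Dict.empty) fuel queue i s result =
      checkGo facts fuel (queue.drop i) result := by
  induction fuel with
  | zero => intro queue i s result _; rfl
  | succ n ih =>
    intro queue i s result hinv
    rw [altGo]
    by_cases h : i < queue.length
    · rw [dif_pos h]
      have hdrop : queue.drop i = queue[i] :: queue.drop (i + 1) :=
        List.drop_eq_getElem_cons h
      rw [hdrop, checkGo]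
      have hidx : (altIndex facts PySem.Dict.empty).getD queue[i] [] =
          facts.filter (fun p => p.1 == queue[i]) := by
        rw [altIndex_getD]; simp [PySem.Dict.getD_empty]
      simp only [hidx]
      obtain ⟨h1, h2⟩ := altInner_eq queue[i] facts s result queue hinv
      rw [h1]
      rw [ih _ _ _ _ h2, List.drop_append_of_le_length (by omega)]
    · rw [dif_neg h]
      have : queue.drop i = [] := List.drop_eq_nil_iff.mpr (by omega)
      rw [this]
      cases n <;> rfl

-- ===== VERDICT (by name: the statement is the Claim_ definition above) =====
theorem check_spec : Claim_equal_check := by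
  intro knowns facts _
  unfold Spec_check check check_alt
  exact by
    rw [altGo_eq_checkGo facts _ knowns 0 PySem.Set.empty [] (by simp [PySem.Set.empty])]
    rfl
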